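-- pv_equiv track=rewrite | github.com/welleazyhts/Renewal-Backend | apps/closed_case_chatbot/views.py | generate_related_suggestions
-- ===== SOURCE A (Python) =====
-- def generate_related_suggestions(user_message, ai_response):
--     """
--     Generate 3 related suggestions based on the user's question and AI response
--     """
--     all_suggestions = [
--         "What are closed cases?",
--         "Show me trends in my closed cases",
--         "What are the common reasons for case closures?",
--         "How many closed cases do I have?",
--         "What is the closed case analysis?",
--         "Show me closed case statistics",
--         "What are the closed case patterns?",
--         "How can I improve case closure rates?",
--         "What insights do closed cases provide?",
--         "Show me closed case performance metrics",
--         "What are the closed case trends?",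
--         "How do closed cases affect renewal rates?",
--         "What is the closed case summary?",
--         "Show me closed case details",
--         "What are the closed case categories?",
--         "How can I reduce case closures?",
--         "What is the closed case impact?",
--         "Show me closed case reports",
--         "What are the closed case insights?",
--         "How do closed cases compare to active cases?"
--     ]
--
--     message_lower = user_message.lower()
--
--     if 'what is' in message_lower or 'explain' in message_lower or 'define' in message_lower:
--         context_suggestions = [
--             "Show me trends in my closed cases",
--             "What are the common reasons for case closures?",
--             "How many closed cases do I have?"
--         ]
--
--     elif 'trend' in message_lower or 'pattern' in message_lower or 'analysis' in message_lower:
--         context_suggestions = [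
--             "What are the common reasons for case closures?",
--             "Show me closed case statistics",
--             "What insights do closed cases provide?"
--         ]
--
--     elif 'reason' in message_lower or 'why' in message_lower or 'cause' in message_lower:
--         context_suggestions = [
--             "Show me trends in my closed cases",
--             "What are the closed case patterns?",
--             "How can I improve case closure rates?"
--         ]
--
--     elif 'how many' in message_lower or 'count' in message_lower or 'total' in message_lower:
--         context_suggestions = [
--             "Show me closed case statistics",
--             "What is the closed case analysis?",
--             "Show me closed case performance metrics"
--         ]
--
--     elif 'statistic' in message_lower or 'metric' in message_lower or 'performance' in message_lower:
--         context_suggestions = [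
--             "What are the closed case trends?",
--             "Show me closed case reports",
--             "What insights do closed cases provide?"
--         ]
--
--     elif 'improve' in message_lower or 'reduce' in message_lower or 'optimize' in message_lower:
--         context_suggestions = [
--             "What are the common reasons for case closures?",
--             "How can I improve case closure rates?",
--             "What insights do closed cases provide?"
--         ]
--
--     elif 'insight' in message_lower or 'impact' in message_lower or 'effect' in message_lower:
--         context_suggestions = [
--             "Show me closed case statistics",
--             "What are the closed case patterns?",
--             "How do closed cases affect renewal rates?"
--         ]
--
--     else:
--         context_suggestions = [
--             "Show me trends in my closed cases",
--             "What are the common reasons for case closures?",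
--             "How many closed cases do I have?"
--         ]
--
--     final_suggestions = []
--     for suggestion in context_suggestions:
--         if suggestion.lower() not in message_lower:
--             final_suggestions.append(suggestion)
--
--     while len(final_suggestions) < 3 and all_suggestions:
--         suggestion = all_suggestions.pop(0)
--         if suggestion.lower() not in message_lower and suggestion not in final_suggestions:
--             final_suggestions.append(suggestion)
--
--     return final_suggestions[:3]
-- ===== SOURCE B (Python) =====
-- # Table-driven rewrite: ordered (keywords -> suggestions) rules replace the if/elif
-- # ladder, and an ordered-dedup pipeline replaces the filter-then-while-pop fill loop.
--
-- _MASTER = [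
--     "What are closed cases?",
--     "Show me trends in my closed cases",
--     "What are the common reasons for case closures?",
--     "How many closed cases do I have?",
--     "What is the closed case analysis?",
--     "Show me closed case statistics",
--     "What are the closed case patterns?",
--     "How can I improve case closure rates?",
--     "What insights do closed cases provide?",
--     "Show me closed case performance metrics",
--     "What are the closed case trends?",
--     "How do closed cases affect renewal rates?",
--     "What is the closed case summary?",
--     "Show me closed case details",
--     "What are the closed case categories?",
--     "How can I reduce case closures?",
--     "What is the closed case impact?",
--     "Show me closed case reports",
--     "What are the closed case insights?",
--     "How do closed cases compare to active cases?",
-- ]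
--
-- _DEFAULT = [
--     "Show me trends in my closed cases",
--     "What are the common reasons for case closures?",
--     "How many closed cases do I have?",
-- ]
--
-- _RULES = [
--     (("what is", "explain", "define"), _DEFAULT),
--     (("trend", "pattern", "analysis"), [
--         "What are the common reasons for case closures?",
--         "Show me closed case statistics",
--         "What insights do closed cases provide?",
--     ]),
--     (("reason", "why", "cause"), [
--         "Show me trends in my closed cases",
--         "What are the closed case patterns?",
--         "How can I improve case closure rates?",
--     ]),
--     (("how many", "count", "total"), [
--         "Show me closed case statistics",
--         "What is the closed case analysis?",
--         "Show me closed case performance metrics",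
--     ]),
--     (("statistic", "metric", "performance"), [
--         "What are the closed case trends?",
--         "Show me closed case reports",
--         "What insights do closed cases provide?",
--     ]),
--     (("improve", "reduce", "optimize"), [
--         "What are the common reasons for case closures?",
--         "How can I improve case closure rates?",
--         "What insights do closed cases provide?",
--     ]),
--     (("insight", "impact", "effect"), [
--         "Show me closed case statistics",
--         "What are the closed case patterns?",
--         "How do closed cases affect renewal rates?",
--     ]),
-- ]
--
--
-- def generate_related_suggestions(user_message, ai_response):
--     msg = user_message.lower()
--     context = next(
--         (sugs for kws, sugs in _RULES if any(k in msg for k in kws)), _DEFAULT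
--     )
--     pool = [s for s in context if s.lower() not in msg] + [
--         s for s in _MASTER if s.lower() not in msg
--     ]
--     return list(dict.fromkeys(pool))[:3]
-- ===== Notes on version B (the rewrite author's own statement) =====
-- stated objective: simpler
-- what changed: The eight-branch if/elif ladder becomes an ordered keyword-rules table scanned for the first match, and the filter-then-while-pop fill loop becomes a single ordered-dedup pipeline (filtered context + filtered master, dict.fromkeys, first three).
import Mathlib
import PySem

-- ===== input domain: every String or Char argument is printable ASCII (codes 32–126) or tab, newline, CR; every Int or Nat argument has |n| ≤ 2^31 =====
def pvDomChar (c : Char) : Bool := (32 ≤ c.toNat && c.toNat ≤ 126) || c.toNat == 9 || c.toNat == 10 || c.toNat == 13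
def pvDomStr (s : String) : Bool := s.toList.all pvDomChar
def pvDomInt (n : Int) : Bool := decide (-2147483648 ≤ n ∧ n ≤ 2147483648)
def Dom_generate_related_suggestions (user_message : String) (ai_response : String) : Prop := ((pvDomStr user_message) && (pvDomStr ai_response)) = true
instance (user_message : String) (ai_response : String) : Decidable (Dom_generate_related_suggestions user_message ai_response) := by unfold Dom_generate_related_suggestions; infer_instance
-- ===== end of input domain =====

-- B replaces the eight-branch if/elif ladder by an ordered rules table (first match wins)
-- and the filter-then-while-pop fill loop by one ordered-dedup pipeline; objective: simpler.

-- ===== PORT A =====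
-- the while-pop fill loop of A, as structural recursion on the remaining master list
def pvA_loop (msg : String) (final : List String) : List String → List String
  | [] => final
  | s :: rest =>
      if final.length < 3 then
        if PySem.Str.isIn (PySem.Str.lower s) msg = false ∧ final.contains s = false then
          pvA_loop msg (final ++ [s]) rest
        else
          pvA_loop msg final rest
      else final

def generate_related_suggestions (user_message : String) (ai_response : String) : List String :=
  let all_suggestions : List String :=
    ["What are closed cases?",
     "Show me trends in my closed cases",
     "What are the common reasons for case closures?",
     "How many closed cases do I have?",
     "What is the closed case analysis?",
     "Show me closed case statistics",
     "What are the closed case patterns?",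
     "How can I improve case closure rates?",
     "What insights do closed cases provide?",
     "Show me closed case performance metrics",
     "What are the closed case trends?",
     "How do closed cases affect renewal rates?",
     "What is the closed case summary?",
     "Show me closed case details",
     "What are the closed case categories?",
     "How can I reduce case closures?",
     "What is the closed case impact?",
     "Show me closed case reports",
     "What are the closed case insights?",
     "How do closed cases compare to active cases?"]
  let message_lower := PySem.Str.lower user_message
  let context_suggestions : List String :=
    if PySem.Str.isIn "what is" message_lower || PySem.Str.isIn "explain" message_lower || PySem.Str.isIn "define" message_lower then
      ["Show me trends in my closed cases",
       "What are the common reasons for case closures?",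
       "How many closed cases do I have?"]
    else if PySem.Str.isIn "trend" message_lower || PySem.Str.isIn "pattern" message_lower || PySem.Str.isIn "analysis" message_lower then
      ["What are the common reasons for case closures?",
       "Show me closed case statistics",
       "What insights do closed cases provide?"]
    else if PySem.Str.isIn "reason" message_lower || PySem.Str.isIn "why" message_lower || PySem.Str.isIn "cause" message_lower then
      ["Show me trends in my closed cases",
       "What are the closed case patterns?",
       "How can I improve case closure rates?"]
    else if PySem.Str.isIn "how many" message_lower || PySem.Str.isIn "count" message_lower || PySem.Str.isIn "total" message_lower then
      ["Show me closed case statistics",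
       "What is the closed case analysis?",
       "Show me closed case performance metrics"]
    else if PySem.Str.isIn "statistic" message_lower || PySem.Str.isIn "metric" message_lower || PySem.Str.isIn "performance" message_lower then
      ["What are the closed case trends?",
       "Show me closed case reports",
       "What insights do closed cases provide?"]
    else if PySem.Str.isIn "improve" message_lower || PySem.Str.isIn "reduce" message_lower || PySem.Str.isIn "optimize" message_lower then
      ["What are the common reasons for case closures?",
       "How can I improve case closure rates?",
       "What insights do closed cases provide?"]
    else if PySem.Str.isIn "insight" message_lower || PySem.Str.isIn "impact" message_lower || PySem.Str.isIn "effect" message_lower then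
      ["Show me closed case statistics",
       "What are the closed case patterns?",
       "How do closed cases affect renewal rates?"]
    else
      ["Show me trends in my closed cases",
       "What are the common reasons for case closures?",
       "How many closed cases do I have?"]
  let final_suggestions :=
    context_suggestions.foldl
      (fun acc s => if PySem.Str.isIn (PySem.Str.lower s) message_lower = false then acc ++ [s] else acc) []
  PySem.List.slice (pvA_loop message_lower final_suggestions all_suggestions) none (some 3)

-- ===== PORT B =====
def pvMaster : List String :=
  ["What are closed cases?",
   "Show me trends in my closed cases",
   "What are the common reasons for case closures?",
   "How many closed cases do I have?",
   "What is the closed case analysis?",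
   "Show me closed case statistics",
   "What are the closed case patterns?",
   "How can I improve case closure rates?",
   "What insights do closed cases provide?",
   "Show me closed case performance metrics",
   "What are the closed case trends?",
   "How do closed cases affect renewal rates?",
   "What is the closed case summary?",
   "Show me closed case details",
   "What are the closed case categories?",
   "How can I reduce case closures?",
   "What is the closed case impact?",
   "Show me closed case reports",
   "What are the closed case insights?",
   "How do closed cases compare to active cases?"]

def pvDefault : List String :=
  ["Show me trends in my closed cases",
   "What are the common reasons for case closures?",
   "How many closed cases do I have?"]

def pvRules : List (List String × List String) :=
  [(["what is", "explain", "define"], pvDefault),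
   (["trend", "pattern", "analysis"],
    ["What are the common reasons for case closures?",
     "Show me closed case statistics",
     "What insights do closed cases provide?"]),
   (["reason", "why", "cause"],
    ["Show me trends in my closed cases",
     "What are the closed case patterns?",
     "How can I improve case closure rates?"]),
   (["how many", "count", "total"],
    ["Show me closed case statistics",
     "What is the closed case analysis?",
     "Show me closed case performance metrics"]),
   (["statistic", "metric", "performance"],
    ["What are the closed case trends?",
     "Show me closed case reports",
     "What insights do closed cases provide?"]),
   (["improve", "reduce", "optimize"],
    ["What are the common reasons for case closures?",
     "How can I improve case closure rates?",
     "What insights do closed cases provide?"]),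
   (["insight", "impact", "effect"],
    ["Show me closed case statistics",
     "What are the closed case patterns?",
     "How do closed cases affect renewal rates?"])]

def generate_related_suggestions_alt (user_message : String) (ai_response : String) : List String :=
  let msg := PySem.Str.lower user_message
  let context :=
    match pvRules.find? (fun r => r.1.any (fun k => PySem.Str.isIn k msg)) with
    | some r => r.2
    | none => pvDefault
  let pool :=
    context.filter (fun s => PySem.Str.isIn (PySem.Str.lower s) msg = false)
      ++ pvMaster.filter (fun s => PySem.Str.isIn (PySem.Str.lower s) msg = false)
  PySem.List.slice (PySem.List.dedup pool) none (some 3)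

-- ===== PRECONDITION & SPEC =====
def Spec_generate_related_suggestions (user_message : String) (ai_response : String) (out : List String) : Prop := out = generate_related_suggestions_alt user_message ai_response
instance (user_message : String) (ai_response : String) (out : List String) : Decidable (Spec_generate_related_suggestions user_message ai_response out) := by unfold Spec_generate_related_suggestions; infer_instance

-- ===== CLAIM (what is proved, stated in full; the proofs are below) =====
def Claim_equal_generate_related_suggestions : Prop := ∀ (user_message : String) (ai_response : String), Dom_generate_related_suggestions user_message ai_response → Spec_generate_related_suggestions user_message ai_response (generate_related_suggestions user_message ai_response)

-- ===== LEMMAS AND PROOFS =====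

lemma pv_foldl_add_prefix (l s : List String) : ∃ t, List.foldl PySem.Set.add s l = s ++ t := by
  induction l generalizing s with
  | nil => exact ⟨[], by simp⟩
  | cons x xs ih =>
    simp only [List.foldl_cons, PySem.Set.add]
    split
    · exact ih s
    · obtain ⟨t, ht⟩ := ih (s ++ [x])
      exact ⟨x :: t, by simpa using ht⟩

lemma pv_loop_eq (msg : String) (rest : List String) :
    ∀ final : List String, final.Nodup →
      (pvA_loop msg final rest).take 3 =
      (List.foldl PySem.Set.add final
        (rest.filter (fun s => decide (PySem.Str.isIn (PySem.Str.lower s) msg = false)))).take 3 := by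
  induction rest with
  | nil => intro final _; simp [pvA_loop]
  | cons x xs ih =>
    intro final hnd
    by_cases hlen : final.length < 3
    · by_cases hp : PySem.Str.isIn (PySem.Str.lower x) msg = false
      · by_cases hm : x ∈ final
        · have hc : final.contains x = true := List.elem_eq_true_of_mem hm
          rw [pvA_loop, if_pos hlen, if_neg (fun h => absurd h.2 (by rw [hc]; simp))]
          rw [List.filter_cons_of_pos (by simp only [decide_eq_true_eq]; exact hp), List.foldl_cons]
          have hadd : PySem.Set.add final x = final := by
            unfold PySem.Set.add PySem.Set.contains; rw [hc]; simp
          rw [hadd]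
          exact ih final hnd
        · have hc : final.contains x = false := by simp [hm]
          rw [pvA_loop, if_pos hlen, if_pos ⟨hp, hc⟩]
          rw [List.filter_cons_of_pos (by simp only [decide_eq_true_eq]; exact hp), List.foldl_cons]
          have hadd : PySem.Set.add final x = final ++ [x] := by
            unfold PySem.Set.add PySem.Set.contains; rw [hc]; simp
          have hnd' : (final ++ [x]).Nodup := by
            simp [List.nodup_append, hnd]
            exact fun a ha h => hm (h ▸ ha)
          rw [hadd]
          exact ih (final ++ [x]) hnd'
      · rw [pvA_loop, if_pos hlen, if_neg (fun h => hp h.1)]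
        rw [List.filter_cons_of_neg (by intro hx; simp only [decide_eq_true_eq] at hx; exact hp hx)]
        exact ih final hnd
    · rw [pvA_loop, if_neg hlen]
      obtain ⟨t, ht⟩ := pv_foldl_add_prefix
        ((x :: xs).filter (fun s => decide (PySem.Str.isIn (PySem.Str.lower s) msg = false))) final
      rw [ht, List.take_append_of_le_length (by omega)]


lemma pv_core (msg : String) (ctx : List String) (hctx : ctx.Nodup) :
    (pvA_loop msg
      (ctx.filter (fun s => decide (PySem.Str.isIn (PySem.Str.lower s) msg = false))) pvMaster).take 3 =
    (PySem.List.dedup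
      (ctx.filter (fun s => decide (PySem.Str.isIn (PySem.Str.lower s) msg = false))
        ++ pvMaster.filter (fun s => decide (PySem.Str.isIn (PySem.Str.lower s) msg = false)))).take 3 := by
  rw [PySem.List.dedup_eq_ofList, PySem.Set.ofList_eq_foldl, List.foldl_append,
      ← PySem.Set.ofList_eq_foldl, PySem.Set.ofList_eq_self_of_nodup _ (hctx.filter _)]
  exact pv_loop_eq msg pvMaster _ (hctx.filter _)

-- ===== VERDICT (by name: the statement is the Claim_ definition above) =====
theorem generate_related_suggestions_spec : Claim_equal_generate_related_suggestions := by
  intro um ar _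
  unfold Spec_generate_related_suggestions generate_related_suggestions generate_related_suggestions_alt
  simp only [PySem.List.foldl_append_ite_eq_filter, List.nil_append,
             List.find?_cons, List.any_cons, List.any_nil, Bool.or_false, Bool.or_assoc,
             pvRules, pvDefault, pvMaster]
  rw [show (3:Int) = ((3:Nat):Int) from rfl]
  simp only [PySem.List.slice_to_natCast]
  by_cases h1 : (PySem.Str.isIn "what is" (PySem.Str.lower um) || (PySem.Str.isIn "explain" (PySem.Str.lower um) || PySem.Str.isIn "define" (PySem.Str.lower um))) = true
  case pos => rw [h1]; simp only [if_true]; exact pv_core _ _ (by decide)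
  case neg =>
  simp only [Bool.not_eq_true] at h1
  rw [h1]
  simp only [Bool.false_eq_true, if_false]
  by_cases h2 : (PySem.Str.isIn "trend" (PySem.Str.lower um) || (PySem.Str.isIn "pattern" (PySem.Str.lower um) || PySem.Str.isIn "analysis" (PySem.Str.lower um))) = true
  case pos => rw [h2]; simp only [if_true]; exact pv_core _ _ (by decide)
  case neg =>
  simp only [Bool.not_eq_true] at h2
  rw [h2]
  simp only [Bool.false_eq_true, if_false]
  by_cases h3 : (PySem.Str.isIn "reason" (PySem.Str.lower um) || (PySem.Str.isIn "why" (PySem.Str.lower um) || PySem.Str.isIn "cause" (PySem.Str.lower um))) = true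
  case pos => rw [h3]; simp only [if_true]; exact pv_core _ _ (by decide)
  case neg =>
  simp only [Bool.not_eq_true] at h3
  rw [h3]
  simp only [Bool.false_eq_true, if_false]
  by_cases h4 : (PySem.Str.isIn "how many" (PySem.Str.lower um) || (PySem.Str.isIn "count" (PySem.Str.lower um) || PySem.Str.isIn "total" (PySem.Str.lower um))) = true
  case pos => rw [h4]; simp only [if_true]; exact pv_core _ _ (by decide)
  case neg =>
  simp only [Bool.not_eq_true] at h4
  rw [h4]
  simp only [Bool.false_eq_true, if_false]
  by_cases h5 : (PySem.Str.isIn "statistic" (PySem.Str.lower um) || (PySem.Str.isIn "metric" (PySem.Str.lower um) || PySem.Str.isIn "performance" (PySem.Str.lower um))) = true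
  case pos => rw [h5]; simp only [if_true]; exact pv_core _ _ (by decide)
  case neg =>
  simp only [Bool.not_eq_true] at h5
  rw [h5]
  simp only [Bool.false_eq_true, if_false]
  by_cases h6 : (PySem.Str.isIn "improve" (PySem.Str.lower um) || (PySem.Str.isIn "reduce" (PySem.Str.lower um) || PySem.Str.isIn "optimize" (PySem.Str.lower um))) = true
  case pos => rw [h6]; simp only [if_true]; exact pv_core _ _ (by decide)
  case neg =>
  simp only [Bool.not_eq_true] at h6
  rw [h6]
  simp only [Bool.false_eq_true, if_false]
  by_cases h7 : (PySem.Str.isIn "insight" (PySem.Str.lower um) || (PySem.Str.isIn "impact" (PySem.Str.lower um) || PySem.Str.isIn "effect" (PySem.Str.lower um))) = true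
  case pos => rw [h7]; simp only [if_true]; exact pv_core _ _ (by decide)
  case neg =>
  simp only [Bool.not_eq_true] at h7
  rw [h7]
  simp only [Bool.false_eq_true, if_false]
  simp only [List.find?_nil]
  exact pv_core _ _ (by decide)
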